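-- pv_equiv track=rewrite | github.com/JohnsonOtto/MapRun-Result-Utilities | regiocup.py | findNmax
-- ===== SOURCE A (Python) =====
-- def findNmax(array, n):
--     if n > len(array):
--         return array
--     tmp = array
--     out = []
--     for i in range(n):
--         m = max(tmp)
--         tmp.remove(m)
--         out.append(m)
--     return out
-- ===== SOURCE B (Python) =====
-- def findNmax(array, n):
--     # Return-value equivalent to A; also mutates `array` like A (removes the
--     # leftmost occurrence of each selected maximum).
--     if n > len(array):
--         return array
--     out = sorted(array, reverse=True)[:n] if n > 0 else []
--     for m in out:
--         array.remove(m)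
--     return out
-- ===== Notes on version B (the rewrite author's own statement) =====
-- stated objective: alternative
-- what changed: Replaces the repeated max-scan-and-remove selection loop by a single descending sort whose n-prefix is the answer (the removal pass only reproduces A's mutation of the input).
import Mathlib
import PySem

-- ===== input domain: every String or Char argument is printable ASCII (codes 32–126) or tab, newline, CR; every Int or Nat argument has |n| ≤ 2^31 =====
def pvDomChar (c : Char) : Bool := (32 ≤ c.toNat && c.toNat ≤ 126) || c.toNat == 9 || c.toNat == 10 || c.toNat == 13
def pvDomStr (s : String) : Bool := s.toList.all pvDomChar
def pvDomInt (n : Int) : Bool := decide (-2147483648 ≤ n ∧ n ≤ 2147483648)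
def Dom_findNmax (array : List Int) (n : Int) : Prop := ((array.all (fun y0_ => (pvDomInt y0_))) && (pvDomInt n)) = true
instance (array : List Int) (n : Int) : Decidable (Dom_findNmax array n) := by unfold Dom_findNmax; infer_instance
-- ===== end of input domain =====

-- B replaces A's repeated max-scan-and-remove selection by one descending sort, taking its
-- n-prefix. Equivalence is about the RETURN value; both Pythons mutate `array` identically.

-- ===== PORT A =====
-- 'for i in range(n): m = max(tmp); tmp.remove(m); out.append(m)' — the fuel is the number
-- of remaining iterations; the 'none' arms are unreachable (n ≤ len(array) in this branch).
def findNmaxLoop : List Int → Nat → List Int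
  | _, 0 => []
  | tmp, k+1 =>
    match PySem.List.max? tmp (fun x => x) with
    | none => []
    | some m =>
      match PySem.List.remove? tmp m with
      | none => []
      | some tmp' => m :: findNmaxLoop tmp' k

def findNmax (array : List Int) (n : Int) : List Int :=
  if n > (array.length : Int) then array
  else findNmaxLoop array n.toNat

-- ===== PORT B =====
def findNmax_alt (array : List Int) (n : Int) : List Int :=
  if n > (array.length : Int) then array
  else if n > 0 then PySem.List.slice (PySem.List.sorted array (fun x => x) true) none (some n)
  else []

-- ===== PRECONDITION & SPEC =====
def Spec_findNmax (array : List Int) (n : Int) (out : List Int) : Prop := out = findNmax_alt array n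
instance (array : List Int) (n : Int) (out : List Int) : Decidable (Spec_findNmax array n out) := by unfold Spec_findNmax; infer_instance

-- ===== CLAIM (what is proved, stated in full; the proofs are below) =====
def Claim_equal_findNmax : Prop := ∀ (array : List Int) (n : Int), Dom_findNmax array n → Spec_findNmax array n (findNmax array n)

-- ===== LEMMAS AND PROOFS =====

-- The maximum is the head of the descending sort: removing it leaves the tail.
theorem sorted_rev_cons_max (tmp : List Int) (m : Int)
    (hm : PySem.List.max? tmp (fun x => x) = some m) :
    PySem.List.sorted tmp (fun x => x) true = m :: PySem.List.sorted (tmp.erase m) (fun x => x) true := by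
  have hmem : m ∈ tmp := PySem.List.max?_mem hm
  have hmax : ∀ y ∈ tmp, y ≤ m := PySem.List.max?_isMax hm
  have hperm1 : (PySem.List.sorted tmp (fun x => x) true).Perm tmp := PySem.List.sorted_perm _ _ _
  have hperm2 : (m :: PySem.List.sorted (tmp.erase m) (fun x => x) true).Perm tmp :=
    (List.Perm.cons m (PySem.List.sorted_perm _ _ _)).trans (List.perm_cons_erase hmem).symm
  have hs1 : (PySem.List.sorted tmp (fun x => x) true).Pairwise (fun a b => b ≤ a) :=
    PySem.List.sorted_pairwise_rev tmp (fun x => x)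
  have hs2 : (m :: PySem.List.sorted (tmp.erase m) (fun x => x) true).Pairwise (fun a b => b ≤ a) := by
    refine List.Pairwise.cons ?_ (PySem.List.sorted_pairwise_rev _ _)
    intro y hy
    exact hmax y (List.mem_of_mem_erase ((PySem.List.mem_sorted _ _ _ _).1 hy))
  exact (hperm1.trans hperm2.symm).eq_of_pairwise
    (fun a b _ _ h1 h2 => le_antisymm h2 h1) hs1 hs2

-- The selection loop computes the k-prefix of the descending sort (k ≤ length).
theorem findNmaxLoop_eq (k : Nat) : ∀ tmp : List Int, k ≤ tmp.length →
    findNmaxLoop tmp k = (PySem.List.sorted tmp (fun x => x) true).take k := by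
  induction k with
  | zero => intro tmp _; simp [findNmaxLoop]
  | succ k ih =>
    intro tmp hk
    have hne : tmp ≠ [] := by intro h; subst h; simp at hk
    obtain ⟨m, hm⟩ := Option.ne_none_iff_exists'.1
      (fun h => hne ((PySem.List.max?_eq_none_iff tmp (fun x : Int => x)).1 h))
    have hmem : m ∈ tmp := PySem.List.max?_mem hm
    have hrem : PySem.List.remove? tmp m = some (tmp.erase m) :=
      PySem.List.remove?_eq_some_erase tmp m hmem
    have hlen : k ≤ (tmp.erase m).length := by
      have := List.length_erase_of_mem hmem; omega
    rw [sorted_rev_cons_max tmp m hm]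
    simp only [findNmaxLoop, hm, hrem, List.take_succ_cons]
    exact congrArg (m :: ·) (ih (tmp.erase m) hlen)

theorem findNmax_spec : Claim_equal_findNmax := by
  intro array n _
  unfold Spec_findNmax findNmax findNmax_alt
  split
  · rfl
  · rename_i hle
    have hlen : n.toNat ≤ array.length := by omega
    rw [findNmaxLoop_eq n.toNat array hlen]
    by_cases hn : n > 0
    · rw [if_pos hn, PySem.List.slice_to _ (by omega)]
    · rw [if_neg hn]
      have : n.toNat = 0 := by omega
      simp [this]
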